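-- pv_equiv track=rewrite | github.com/kittilsenstian-debug/the-hand | theory-tools/all_fibers_physics.py | stabilized_theta4
-- ===== SOURCE A (Python) =====
-- def mult_order(a, p):
--     """Multiplicative order of a in GF(p). Returns None if a=0."""
--     a = a % p
--     if a == 0:
--         return None
--     val = a
--     for k in range(1, p):
--         if val == 1:
--             return k
--         val = (val * a) % p
--     return p - 1  # should not reach here for prime p
--
-- def stabilized_theta4(q, p):
--     """Compute θ₄(q) mod p with same approach."""
--     if q % p == 0:
--         return 1
--
--     o = mult_order(q, p)
--     result = 1
--     for n in range(1, o):
--         qn2 = pow(q, n * n, p)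
--         sign = 1 if n % 2 == 0 else p - 1
--         result = (result + 2 * sign * qn2) % p
--     return result
-- ===== SOURCE B (Python) =====
-- def _ord(a, p):
--     """Order helper: smallest k in [1, p-1] with a^k == 1 (mod p), else max(k reached).
--     Returns None if a % p == 0 (matches mult_order's contract)."""
--     v = a % p
--     if v == 0:
--         return None
--     k = 1
--     while v != 1 and k < p - 1:
--         v = v * a % p
--         k += 1
--     return k
--
-- def stabilized_theta4(q, p):
--     """Compute θ₄(q) mod p, updating q^(n²) incrementally instead of calling pow each step."""
--     if q % p == 0:
--         return 1
--     o = _ord(q, p)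
--     q1 = q % p
--     q2 = q1 * q1 % p
--     cur = 1        # q^((n-1)^2) mod p before iteration n
--     step = q1      # q^(2n-1)   mod p before iteration n
--     result = 1
--     for n in range(1, o):
--         cur = cur * step % p
--         step = step * q2 % p
--         result = (result + 2 * cur) % p if n % 2 == 0 else (result - 2 * cur) % p
--     return result
-- ===== Notes on version B (the rewrite author's own statement) =====
-- stated objective: faster
-- what changed: B replaces the per-iteration modular exponentiation pow(q, n*n, p) with an incremental update cur = cur*step % p, step = step*q^2 % p that maintains q^(n^2) mod p across iterations (and uses a while-loop order search), removing the log-factor exponentiation from each step.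
import Mathlib
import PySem

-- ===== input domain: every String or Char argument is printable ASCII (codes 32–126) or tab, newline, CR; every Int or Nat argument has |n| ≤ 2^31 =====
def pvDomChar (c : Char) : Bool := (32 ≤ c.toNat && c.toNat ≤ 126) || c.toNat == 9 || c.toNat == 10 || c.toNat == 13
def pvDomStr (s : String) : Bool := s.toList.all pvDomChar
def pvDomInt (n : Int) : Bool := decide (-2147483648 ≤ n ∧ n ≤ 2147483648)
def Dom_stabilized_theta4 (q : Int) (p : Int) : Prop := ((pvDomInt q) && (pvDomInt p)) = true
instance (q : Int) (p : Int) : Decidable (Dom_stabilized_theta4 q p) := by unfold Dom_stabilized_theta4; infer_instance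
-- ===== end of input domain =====

-- B replaces the per-iteration modular exponentiation pow(q, n*n, p) with an incremental
-- update of q^(n²) mod p (two modular multiplies per step).

-- ===== PORT A =====
-- for k in range(1, p): if val == 1: return k; val = (val * a) % p   — else return p - 1
-- (the lazy `for k in range(1, p)` is ported as a counter recursion on k)
def multOrderLoopA (a p val k : Int) : Int :=
  if k < p then
    (if val = 1 then k else multOrderLoopA a p (PySem.Int.mod (val * a) p) (k + 1))
  else p - 1
termination_by (p - k).toNat
decreasing_by omega

-- mult_order(a, p): returns None iff a % p == 0
def multOrderA (a p : Int) : Option Int :=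
  let a' := PySem.Int.mod a p
  if a' = 0 then none else some (multOrderLoopA a' p a' 1)

-- pow(b, e, m): CPython's three-argument pow = binary square-and-multiply, each product
-- reduced by Python's %; exact for e ≥ 0 (the only exponents A uses)
def powModA (b : Int) (e : Nat) (m : Int) : Int :=
  if e = 0 then PySem.Int.mod 1 m
  else
    let h := powModA b (e / 2) m
    let h2 := PySem.Int.mod (h * h) m
    if e % 2 = 1 then PySem.Int.mod (h2 * b) m else h2

def stabilized_theta4 (q : Int) (p : Int) : Int :=
  if PySem.Int.mod q p = 0 then 1
  else
    -- o = mult_order(q, p); the None case is unreachable here since q % p ≠ 0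
    let o := (multOrderA q p).getD 0
    (PySem.List.pyRange 1 o 1).foldl (fun result n =>
      let qn2 := powModA q (n * n).toNat p
      let sign := if PySem.Int.mod n 2 = 0 then 1 else p - 1
      PySem.Int.mod (result + 2 * sign * qn2) p) 1

-- ===== PORT B =====
-- while v != 1 and k < p - 1: v = v * a % p; k += 1
def ordLoopB (a p v k : Int) : Int :=
  if v ≠ 1 ∧ k < p - 1 then ordLoopB a p (PySem.Int.mod (v * a) p) (k + 1) else k
termination_by (p - 1 - k).toNat
decreasing_by omega

def ordB (a p : Int) : Option Int :=
  let v := PySem.Int.mod a p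
  if v = 0 then none else some (ordLoopB a p v 1)

def stabilized_theta4_alt (q : Int) (p : Int) : Int :=
  if PySem.Int.mod q p = 0 then 1
  else
    let o := (ordB q p).getD 0
    let q1 := PySem.Int.mod q p
    let q2 := PySem.Int.mod (q1 * q1) p
    -- state (cur, step, result): cur = q^((n-1)²) mod p, step = q^(2n-1) mod p before step n
    let s := (PySem.List.pyRange 1 o 1).foldl (fun (st : Int × Int × Int) n =>
      let cur := PySem.Int.mod (st.1 * st.2.1) p
      let step := PySem.Int.mod (st.2.1 * q2) p
      let result := if PySem.Int.mod n 2 = 0 then PySem.Int.mod (st.2.2 + 2 * cur) p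
                    else PySem.Int.mod (st.2.2 - 2 * cur) p
      (cur, step, result)) (1, q1, 1)
    s.2.2

-- ===== PRECONDITION & SPEC =====
-- Pre_ excludes only p = 0, where the Python A raises ZeroDivisionError on `q % p`.
def Pre_stabilized_theta4 (q : Int) (p : Int) : Prop := p ≠ 0
instance (q : Int) (p : Int) : Decidable (Pre_stabilized_theta4 q p) := by unfold Pre_stabilized_theta4; infer_instance

def pvWitness_stabilized_theta4 : Int × Int := (3, 7)

def Spec_stabilized_theta4 (q : Int) (p : Int) (out : Int) : Prop := out = stabilized_theta4_alt q p
instance (q : Int) (p : Int) (out : Int) : Decidable (Spec_stabilized_theta4 q p out) := by unfold Spec_stabilized_theta4; infer_instance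

-- ===== CLAIM (what is proved, stated in full; the proofs are below) =====
def Claim_equal_stabilized_theta4 : Prop := ∀ (q : Int) (p : Int), Dom_stabilized_theta4 q p → Pre_stabilized_theta4 q p → Spec_stabilized_theta4 q p (stabilized_theta4 q p)

-- ===== LEMMAS AND PROOFS =====

-- A's search over range(k, p) and B's while-loop from counter k agree while 1 ≤ k ≤ p - 1.
-- (A multiplies by aA = q % p, B by aB = q; congruent multipliers give identical states.)
lemma ord_loops_eq (aA aB p : Int)
    (ha : ∀ w : Int, PySem.Int.mod (w * aA) p = PySem.Int.mod (w * aB) p) :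
    ∀ (c : Nat) (v k : Int), (p - 1 - k).toNat ≤ c → 1 ≤ k → k ≤ p - 1 →
      multOrderLoopA aA p v k = ordLoopB aB p v k := by
  intro c
  induction c with
  | zero =>
    intro v k hc h1 h2
    have hk : k = p - 1 := by omega
    subst hk
    rw [multOrderLoopA, if_pos (by omega), ordLoopB]
    by_cases hv : v = 1
    · simp [hv]
    · rw [if_neg hv, if_neg (fun h => absurd h.2 (by omega)), multOrderLoopA, if_neg (by omega)]
  | succ c ih =>
    intro v k hc h1 h2
    rw [multOrderLoopA, if_pos (by omega), ordLoopB]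
    by_cases hv : v = 1
    · simp [hv]
    · rw [if_neg hv]
      by_cases hk : k < p - 1
      · rw [if_pos ⟨hv, hk⟩, ha v]
        exact ih _ (k + 1) (by omega) (by omega) (by omega)
      · have hk' : k = p - 1 := by omega
        rw [if_neg (by tauto)]
        subst hk'
        rw [multOrderLoopA, if_neg (by omega)]

-- square-and-multiply agrees with b^e % p for a positive modulus
lemma powModA_eq (b p : Int) (hp : 2 ≤ p) :
    ∀ (c e : Nat), e ≤ c → powModA b e p = (b ^ e) % p := by
  have hmodp : ∀ x : Int, PySem.Int.mod x p = x % p :=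
    fun x => PySem.Int.mod_eq_emod_of_pos (by omega)
  intro c
  induction c with
  | zero =>
    intro e he
    have : e = 0 := by omega
    subst this
    rw [powModA]
    simp [hmodp]
  | succ c ih =>
    intro e he
    by_cases h0 : e = 0
    · subst h0; rw [powModA]; simp [hmodp]
    · rw [powModA, if_neg h0]
      simp only [ih (e / 2) (by omega), hmodp]
      have hh : ((b ^ (e / 2) % p) * (b ^ (e / 2) % p)) % p = (b ^ (2 * (e / 2))) % p := by
        rw [← Int.mul_emod, ← pow_add, show e / 2 + e / 2 = 2 * (e / 2) from by ring]
      by_cases hpar : e % 2 = 1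
      · rw [if_pos hpar, hh]
        calc (b ^ (2 * (e / 2)) % p * b) % p
            = (b ^ (2 * (e / 2)) % p % p * (b % p)) % p := Int.mul_emod _ _ _
          _ = (b ^ (2 * (e / 2)) % p * (b % p)) % p := by
              rw [Int.emod_emod_of_dvd _ dvd_rfl]
          _ = (b ^ (2 * (e / 2)) * b) % p := (Int.mul_emod _ _ _).symm
          _ = (b ^ e) % p := by
              rw [← pow_succ, show 2 * (e / 2) + 1 = e from by omega]
      · rw [if_neg hpar, hh, show 2 * (e / 2) = e from by omega]

-- Main loop invariant: with congruent power state and equal accumulators, the two folds agree.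
lemma theta_loops_eq (q p : Int) (hp : 2 ≤ p) (q2 : Int) (hq2 : q2 % p = (q * q) % p) :
    ∀ (c : Nat) (i : Nat) (o r cur step : Int),
      (o - (1 + (i : Int))).toNat ≤ c →
      cur % p = (q ^ (i * i)) % p →
      step % p = (q ^ (2 * i + 1)) % p →
      (PySem.List.pyRange (1 + (i : Int)) o 1).foldl (fun result n =>
        let qn2 := powModA q (n * n).toNat p
        let sign := if PySem.Int.mod n 2 = 0 then 1 else p - 1
        PySem.Int.mod (result + 2 * sign * qn2) p) r
      = ((PySem.List.pyRange (1 + (i : Int)) o 1).foldl (fun (st : Int × Int × Int) n =>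
          let cur := PySem.Int.mod (st.1 * st.2.1) p
          let step := PySem.Int.mod (st.2.1 * q2) p
          let result := if PySem.Int.mod n 2 = 0 then PySem.Int.mod (st.2.2 + 2 * cur) p
                        else PySem.Int.mod (st.2.2 - 2 * cur) p
          (cur, step, result)) (cur, step, r)).2.2 := by
  have hmodp : ∀ x : Int, PySem.Int.mod x p = x % p :=
    fun x => PySem.Int.mod_eq_emod_of_pos (by omega)
  intro c
  induction c with
  | zero =>
    intro i o r cur step hc _ _
    rw [PySem.List.pyRange_one_eq_nil (by omega)]
    simp
  | succ c ih =>
    intro i o r cur step hc hcur hstep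
    by_cases ho : o ≤ 1 + (i : Int)
    · rw [PySem.List.pyRange_one_eq_nil (by omega)]
      simp
    · rw [PySem.List.pyRange_one_cons (by omega)]
      simp only [List.foldl_cons]
      -- exponent bookkeeping
      have hE : ((1 + (i : Int)) * (1 + (i : Int))).toNat = (i + 1) * (i + 1) := by
        have h : (1 + (i : Int)) * (1 + (i : Int)) = (((i + 1) * (i + 1) : Nat) : Int) := by
          push_cast; ring
        rw [h, Int.toNat_natCast]
      have hqn2 : powModA q ((1 + (i : Int)) * (1 + (i : Int))).toNat p
          = (q ^ ((i + 1) * (i + 1))) % p := by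
        rw [hE]; exact powModA_eq q p hp _ _ le_rfl
      -- new cur is congruent to q^((i+1)²)
      have hcurN : ((cur * step) % p) % p = q ^ ((i + 1) * (i + 1)) % p := by
        calc ((cur * step) % p) % p = (cur * step) % p := Int.emod_emod_of_dvd _ dvd_rfl
          _ = (q ^ (i * i) * q ^ (2 * i + 1)) % p := Int.ModEq.mul hcur hstep
          _ = q ^ ((i + 1) * (i + 1)) % p := by rw [← pow_add]; congr 2; ring
      -- new step is congruent to q^(2(i+1)+1)
      have hstepN : ((step * q2) % p) % p = q ^ (2 * (i + 1) + 1) % p := by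
        calc ((step * q2) % p) % p = (step * q2) % p := Int.emod_emod_of_dvd _ dvd_rfl
          _ = (q ^ (2 * i + 1) * (q * q)) % p := Int.ModEq.mul hstep hq2
          _ = q ^ (2 * (i + 1) + 1) % p := by
              rw [show q * q = q ^ 2 from (pow_two q).symm, ← pow_add,
                  show 2 * i + 1 + 2 = 2 * (i + 1) + 1 from by ring]
      -- A's term is congruent to B's term
      have hx : (q ^ ((i + 1) * (i + 1)) % p) % p = ((cur * step) % p) % p := by
        rw [Int.emod_emod_of_dvd _ dvd_rfl, hcurN]
      have hres : PySem.Int.mod (r + 2 * (if PySem.Int.mod (1 + (i : Int)) 2 = 0 then 1 else p - 1)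
                    * powModA q ((1 + (i : Int)) * (1 + (i : Int))).toNat p) p
          = (if PySem.Int.mod (1 + (i : Int)) 2 = 0
             then PySem.Int.mod (r + 2 * PySem.Int.mod (cur * step) p) p
             else PySem.Int.mod (r - 2 * PySem.Int.mod (cur * step) p) p) := by
        rw [hqn2]
        by_cases hpar : PySem.Int.mod (1 + (i : Int)) 2 = 0
        · rw [if_pos hpar, if_pos hpar, hmodp, hmodp, hmodp]
          have h1 : 2 * 1 * (q ^ ((i + 1) * (i + 1)) % p) ≡ 2 * ((cur * step) % p) [ZMOD p] := by
            have := Int.ModEq.mul_left 2 (show (q ^ ((i + 1) * (i + 1)) % p)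
                ≡ ((cur * step) % p) [ZMOD p] from hx)
            simpa [mul_assoc] using this
          exact Int.ModEq.add_left r h1
        · rw [if_neg hpar, if_neg hpar, hmodp, hmodp, hmodp]
          have hp1 : (p - 1) ≡ -1 [ZMOD p] := by
            rw [Int.modEq_iff_dvd]; exact ⟨-1, by ring⟩
          have h1 : 2 * (p - 1) * (q ^ ((i + 1) * (i + 1)) % p)
              ≡ 2 * (-1) * ((cur * step) % p) [ZMOD p] :=
            Int.ModEq.mul (Int.ModEq.mul_left 2 hp1) hx
          have h2 := Int.ModEq.add_left r h1
          have h3 : r + 2 * (-1) * ((cur * step) % p) = r - 2 * ((cur * step) % p) := by ring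
          rw [h3] at h2
          exact h2
      rw [hres]
      have hcast : (1 : Int) + ((i : Nat) + 1 : Nat) = (1 + (i : Int)) + 1 := by push_cast; ring
      have := ih (i + 1) o
        ((if PySem.Int.mod (1 + (i : Int)) 2 = 0
          then PySem.Int.mod (r + 2 * PySem.Int.mod (cur * step) p) p
          else PySem.Int.mod (r - 2 * PySem.Int.mod (cur * step) p) p))
        (PySem.Int.mod (cur * step) p) (PySem.Int.mod (step * q2) p)
        (by rw [hcast]; omega)
        (by rw [hmodp]; exact hcurN)
        (by rw [hmodp]; exact hstepN)
      rw [hcast] at this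
      exact this

-- ===== VERDICT (by name: the statement is the Claim_ definition above) =====
theorem stabilized_theta4_spec : Claim_equal_stabilized_theta4 := by
  intro q p _hdom hpre
  unfold Pre_stabilized_theta4 at hpre
  unfold Spec_stabilized_theta4
  unfold stabilized_theta4 stabilized_theta4_alt
  by_cases h0 : PySem.Int.mod q p = 0
  · simp [h0]
  · simp only [if_neg h0]
    have hp1 : p ≠ 1 := by
      intro h; subst h
      have h1 := PySem.Int.mod_nonneg q (b := 1) (by omega)
      have h2 := PySem.Int.mod_lt q (b := 1) (by omega)
      omega
    have hpm1 : p ≠ -1 := by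
      intro h; subst h
      have := PySem.Int.mod_neg_bounds q (b := -1) (by omega)
      omega
    rcases (by omega : p ≤ -2 ∨ 2 ≤ p) with hneg | hp
    · -- p ≤ -2: both loops are empty and both return 1
      simp only [multOrderA, ordB, if_neg h0, Option.getD_some]
      rw [multOrderLoopA, if_neg (by omega), ordLoopB, if_neg (by omega)]
      rw [PySem.List.pyRange_one_eq_nil (by omega), PySem.List.pyRange_one_eq_nil (by omega)]
      simp
    · -- p ≥ 2: the two order computations agree, then the loop invariant applies
      have hmodp : ∀ x : Int, PySem.Int.mod x p = x % p :=
        fun x => PySem.Int.mod_eq_emod_of_pos (by omega)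
      have ha : ∀ w : Int, PySem.Int.mod (w * PySem.Int.mod q p) p = PySem.Int.mod (w * q) p := by
        intro w
        rw [hmodp, hmodp, hmodp]
        conv_rhs => rw [Int.mul_emod]
        rw [Int.mul_emod, Int.emod_emod_of_dvd _ dvd_rfl]
      have ho : multOrderLoopA (PySem.Int.mod q p) p (PySem.Int.mod q p) 1
          = ordLoopB q p (PySem.Int.mod q p) 1 :=
        ord_loops_eq (PySem.Int.mod q p) q p ha (p - 2).toNat (PySem.Int.mod q p) 1
          (by omega) (by omega) (by omega)
      simp only [multOrderA, ordB, if_neg h0, Option.getD_some, ho]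
      set o := ordLoopB q p (PySem.Int.mod q p) 1 with ho_def
      have hq2 : PySem.Int.mod (PySem.Int.mod q p * PySem.Int.mod q p) p % p = (q * q) % p := by
        rw [hmodp, hmodp, Int.emod_emod_of_dvd _ dvd_rfl, ← Int.mul_emod]
      have := theta_loops_eq q p hp (PySem.Int.mod (PySem.Int.mod q p * PySem.Int.mod q p) p) hq2
        (o - 1).toNat 0 o 1 1 (PySem.Int.mod q p)
        (by omega)
        (by norm_num)
        (by rw [hmodp]; norm_num [Int.emod_emod_of_dvd _ dvd_rfl])
      simpa using this
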